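-- pv_equiv track=rewrite | github.com/xiaxin23/Edge-Device-Operating-Framework | DeepZero_test/hybrid_pipeline_training.py | _balanced_sizes
-- ===== SOURCE A (Python) =====
-- def _balanced_sizes(total, K):
--     # 允许不能整除，余数分配到前面几个分片
--     base = total // K
--     rem = total % K
--     sizes = [(base + 1 if i < rem else base) for i in range(K)]
--     offs = [0]
--     for sz in sizes:
--         offs.append(offs[-1] + sz)
--     return sizes, offs[:-1]  # sizes, offsets(起点)
-- ===== SOURCE B (Python) =====
-- def _balanced_sizes(total, K):
--     # Sizes by list repetition, offsets in closed form: no accumulation loop.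
--     base, rem = divmod(total, K)
--     sizes = [base + 1] * rem + [base] * (K - rem)
--     offs = [i * base + min(i, rem) for i in range(K)]
--     return sizes, offs
-- ===== Notes on version B (the rewrite author's own statement) =====
-- stated objective: idiomatic
-- what changed: Builds sizes by list repetition ([base+1]*rem + [base]*(K-rem)) and computes each offset independently in closed form (i*base + min(i, rem)) instead of A's per-index conditional and running-total prefix-sum loop.
import Mathlib
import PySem

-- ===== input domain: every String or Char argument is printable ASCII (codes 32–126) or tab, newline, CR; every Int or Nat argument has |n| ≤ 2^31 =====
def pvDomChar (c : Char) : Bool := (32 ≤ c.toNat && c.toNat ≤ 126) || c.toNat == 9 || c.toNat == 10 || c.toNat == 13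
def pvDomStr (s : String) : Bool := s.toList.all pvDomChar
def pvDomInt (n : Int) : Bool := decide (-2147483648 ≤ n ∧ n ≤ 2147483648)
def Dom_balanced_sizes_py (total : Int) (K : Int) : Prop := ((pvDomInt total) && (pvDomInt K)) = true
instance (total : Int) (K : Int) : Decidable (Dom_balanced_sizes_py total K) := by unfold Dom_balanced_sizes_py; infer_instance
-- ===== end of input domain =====

-- B builds sizes by list repetition and computes each offset in closed form (i*base + min(i, rem)) instead of A's per-index if and running-total loop (idiomatic; same cost).

-- ===== PORT A =====
def balanced_sizes_py (total : Int) (K : Int) : List Int × List Int :=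
  let base := PySem.Int.floordiv total K
  let rem := PySem.Int.mod total K
  let sizes := (PySem.List.pyRange 0 K 1).map (fun i => if i < rem then base + 1 else base)
  let offs := sizes.foldl (fun offs sz => offs ++ [PySem.List.pyGetD offs (-1) 0 + sz]) [0]
  (sizes, PySem.List.slice offs none (some (-1)))

-- ===== PORT B =====
def balanced_sizes_py_alt (total : Int) (K : Int) : List Int × List Int :=
  match PySem.Int.divmod? total K with
  | none => ([], [])  -- divmod raises ZeroDivisionError when K = 0 (excluded by Pre_)
  | some (base, rem) =>
    let sizes := PySem.List.pyRepeat [base + 1] rem ++ PySem.List.pyRepeat [base] (K - rem)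
    let offs := (PySem.List.pyRange 0 K 1).map (fun i => i * base + min i rem)
    (sizes, offs)

-- ===== PRECONDITION & SPEC =====
-- Python raises ZeroDivisionError at total // K when K == 0; that is the only input A raises on.
def Pre_balanced_sizes_py (total : Int) (K : Int) : Prop := K ≠ 0
instance (total : Int) (K : Int) : Decidable (Pre_balanced_sizes_py total K) := by unfold Pre_balanced_sizes_py; infer_instance
def pvWitness_balanced_sizes_py : Int × Int := (7, 3)

def Spec_balanced_sizes_py (total : Int) (K : Int) (out : List Int × List Int) : Prop := out = balanced_sizes_py_alt total K
instance (total : Int) (K : Int) (out : List Int × List Int) : Decidable (Spec_balanced_sizes_py total K out) := by unfold Spec_balanced_sizes_py; infer_instance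

-- ===== CLAIM (what is proved, stated in full; the proofs are below) =====
def Claim_equal_balanced_sizes_py : Prop := ∀ (total : Int) (K : Int), Dom_balanced_sizes_py total K → Pre_balanced_sizes_py total K → Spec_balanced_sizes_py total K (balanced_sizes_py total K)

-- ===== LEMMAS AND PROOFS =====

-- A's per-index if over range n equals B's two replicate blocks (r = number of enlarged parts).
theorem pv_sizes_blocks (a b : Int) (r n : Nat) (h : r ≤ n) :
    (List.range n).map (fun (k : Nat) => if (k : Int) < (r : Int) then a else b)
    = List.replicate r a ++ List.replicate (n - r) b := by
  apply List.ext_getElem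
  · simp; omega
  · intro i h1 h2
    simp only [List.getElem_map, List.getElem_range]
    by_cases hi : i < r
    · rw [List.getElem_append_left (by simpa), List.getElem_replicate, if_pos (by exact_mod_cast hi)]
    · rw [List.getElem_append_right (by simpa using hi), List.getElem_replicate,
        if_neg (by push_cast; omega)]

-- A's offs loop, started at [0], builds exactly the closed-form offsets plus the final total.
theorem pv_fold_offs (base rem : Int) (hrem : 0 ≤ rem) (n : Nat) :
    ((List.range n).map (fun (k : Nat) => if (k : Int) < rem then base + 1 else base)).foldl
      (fun offs sz => offs ++ [PySem.List.pyGetD offs (-1) 0 + sz]) [0]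
    = ((List.range n).map (fun (k : Nat) => (k : Int) * base + min (k : Int) rem)) ++ [(n : Int) * base + min (n : Int) rem] := by
  induction n with
  | zero => simp [min_eq_left hrem]
  | succ n ih =>
    rw [List.range_succ, List.map_append, List.map_append, List.foldl_append, ih]
    simp only [List.map_cons, List.map_nil, List.foldl_cons, List.foldl_nil,
      PySem.List.pyGetD_neg_one_append_singleton, List.append_assoc]
    congr 2
    by_cases h : (n : Int) < rem
    · have h1 : min (n : Int) rem = (n : Int) := min_eq_left (le_of_lt h)
      have h2 : min ((n : Int) + 1) rem = (n : Int) + 1 := min_eq_left (by omega)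
      push_cast
      rw [h1, if_pos h, h2]
      ring_nf
    · have h1 : min (n : Int) rem = rem := min_eq_right (by omega)
      have h2 : min ((n : Int) + 1) rem = rem := min_eq_right (by omega)
      push_cast
      rw [h1, if_neg h, h2]
      ring_nf

-- ===== VERDICT (by name: the statement is the Claim_ definition above) =====
theorem balanced_sizes_py_spec : Claim_equal_balanced_sizes_py := by
  intro total K _hdom hK
  unfold Spec_balanced_sizes_py balanced_sizes_py balanced_sizes_py_alt
  have hK0 : K ≠ 0 := hK
  have hdm : PySem.Int.divmod? total K
      = some (PySem.Int.floordiv total K, PySem.Int.mod total K) := by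
    simp [PySem.Int.divmod?, hK0, PySem.Int.floordiv, PySem.Int.mod]
  rw [hdm]
  by_cases hKpos : 0 < K
  · have hrem : 0 ≤ PySem.Int.mod total K := PySem.Int.mod_nonneg _ hKpos
    have hremK : PySem.Int.mod total K < K := PySem.Int.mod_lt _ hKpos
    have hR : PySem.List.pyRange 0 K 1 = (List.range K.toNat).map (Nat.cast : Nat → Int) := by
      have hKn : K = ((K.toNat : Nat) : Int) := by omega
      rw [hKn]; exact PySem.List.pyRange_zero_natCast _
    refine Prod.ext ?_ ?_
    · simp only []
      rw [hR, List.map_map, Function.comp_def]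
      have hr : PySem.Int.mod total K = (((PySem.Int.mod total K).toNat : Nat) : Int) := by omega
      rw [hr, pv_sizes_blocks _ _ _ _ (by omega),
        PySem.List.pyRepeat_singleton, PySem.List.pyRepeat_singleton]
      congr 2 <;> omega
    · simp only []
      rw [hR, List.map_map, List.map_map, Function.comp_def, Function.comp_def,
        pv_fold_offs _ _ hrem, PySem.List.slice_to_neg_one, List.dropLast_concat]
  · have hle : K ≤ 0 := by omega
    have hnil : PySem.List.pyRange 0 K 1 = [] := PySem.List.pyRange_one_eq_nil hle
    have hb := PySem.Int.mod_neg_bounds total (show K < 0 by omega)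
    have hrle : PySem.Int.mod total K ≤ 0 := hb.2
    have hKr : K - PySem.Int.mod total K ≤ 0 := by omega
    simp [hnil, PySem.List.pyGetD, PySem.List.slice_to_neg_one, PySem.List.pyRepeat,
      Int.toNat_of_nonpos hrle, Int.toNat_of_nonpos hKr]
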